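-- pv_equiv track=rewrite | github.com/JamesMcGaa/AdventOfCodeAll | Advent2021Python/p17/solution17.py | hits_y_timestamps
-- ===== SOURCE A (Python) =====
-- def hits_y_timestamps(y_velocity, y_ranges):
--     timestamps = []
--
--     timestamp = 0
--     y_pos = 0
--     while y_pos >= y_ranges[0] or y_velocity > 0: #if we are both falling and below, return
--         timestamp += 1
--         new_y_pos = y_pos + y_velocity
--         new_y_velocity = y_velocity - 1
--
--         if new_y_pos >= y_ranges[0] and new_y_pos <= y_ranges[1]:
--             timestamps.append(timestamp)
--
--         y_pos = new_y_pos
--         y_velocity = new_y_velocity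
--
--     return timestamps
-- ===== SOURCE B (Python) =====
-- def _isqrt(n):
--     # floor square root of n >= 0 by binary search on [0, n+1)
--     lo, hi = 0, n + 1
--     while hi - lo > 1:
--         mid = (lo + hi) // 2
--         if mid * mid <= n:
--             lo = mid
--         else:
--             hi = mid
--     return lo
--
--
-- def _odds(a, c):
--     # odd integers in [a, c], ascending
--     start = a if a % 2 != 0 else a + 1
--     return list(range(start, c + 1, 2))
--
--
-- def hits_y_timestamps(y_velocity, y_ranges):
--     # y(t) = t*(2v+1-t)/2; with b = 2v+1 and u = 2t-b we have u*u = b*b - 8*y(t),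
--     # so lo <= y(t) <= hi  iff  b*b-8*hi <= u*u <= b*b-8*lo, and t >= 1 iff u >= 2-b.
--     lo, hi = y_ranges[0], y_ranges[1]
--     b = 2 * y_velocity + 1
--     d1 = b * b - 8 * lo
--     if d1 < 0:
--         return []
--     r1 = _isqrt(d1)
--     d2 = b * b - 8 * hi
--     m = 1 if d2 <= 0 else _isqrt(d2 - 1) + 1
--     return [(u + b) // 2 for u in _odds(-r1, -m) + _odds(m, r1) if u >= 2 - b]
-- ===== Notes on version B (the rewrite author's own statement) =====
-- stated objective: faster
-- what changed: A simulates the trajectory step by step until it falls below the target (O(steps) ~ velocity + sqrt(|y_min|)); B solves the quadratic height inequalities in closed form with a binary-search integer square root and enumerates only the timestamps that hit the target band.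
-- outside the precondition, e.g. on hits_y_timestamps(0, [5]): A returns [], B raises IndexError
import Mathlib
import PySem

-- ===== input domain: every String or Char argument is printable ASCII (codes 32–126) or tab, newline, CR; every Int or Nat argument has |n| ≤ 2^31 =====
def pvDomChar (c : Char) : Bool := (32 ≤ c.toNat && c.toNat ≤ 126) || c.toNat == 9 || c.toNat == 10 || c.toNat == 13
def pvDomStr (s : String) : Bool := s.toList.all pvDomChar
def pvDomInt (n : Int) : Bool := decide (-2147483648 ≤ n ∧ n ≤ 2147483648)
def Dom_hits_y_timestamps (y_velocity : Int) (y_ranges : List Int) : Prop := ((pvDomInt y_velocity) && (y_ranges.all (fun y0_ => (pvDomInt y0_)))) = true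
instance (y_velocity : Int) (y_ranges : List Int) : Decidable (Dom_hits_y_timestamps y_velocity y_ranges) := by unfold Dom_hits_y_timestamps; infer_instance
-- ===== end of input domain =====

-- B replaces A's step-by-step trajectory simulation by solving the quadratic
-- height inequalities with an integer square root and enumerating only the hit
-- timestamps (objective: faster, asymptotic).

-- ===== PORT A =====
-- A's while loop: state (y_pos, y_velocity, timestamp, timestamps); the guard and the
-- append are exactly Python's; new_y_pos = y + v is inlined at its two use sites.
-- The Nat fuel is only a totality guard: hits_y_timestamps passes hitsFuel, a bound
-- on the number of iterations (proved sufficient below), so the 0-case is never hit.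
def hitsAux (lo hi : Int) : Nat → Int → Int → Int → List Int → List Int
  | 0, _, _, _, acc => acc
  | fuel + 1, y, v, t, acc =>
    if lo ≤ y ∨ 0 < v then
      hitsAux lo hi fuel (y + v) (v - 1) (t + 1)
        (if lo ≤ y + v ∧ y + v ≤ hi then acc ++ [t + 1] else acc)
    else acc

def hitsFuel (lo y v : Int) : Nat :=
  (2 * y + (if 0 < v then v * (v + 1) else 0) - 2 * lo + 1).toNat + (v + 1).toNat

-- Python reads y_ranges[0] / y_ranges[1]; on lists shorter than 2 it raises IndexError
-- (except when the target is never reached) — those inputs are outside Pre_ and the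
-- port returns [] there.
def hits_y_timestamps (y_velocity : Int) (y_ranges : List Int) : List Int :=
  match y_ranges with
  | lo :: hi :: _ => hitsAux lo hi (hitsFuel lo 0 y_velocity) 0 y_velocity 0 []
  | _ => []

-- ===== PORT B =====
-- Source B's _isqrt: binary search on [0, n+1); mid is inlined at its use sites.
-- The Nat fuel is only a totality guard: pyIsqrt passes the interval width, a bound
-- on the number of halving steps (proved sufficient below).
def isqrtAux (n : Int) : Nat → Int → Int → Int
  | 0, lo, _ => lo
  | fuel + 1, lo, hi =>
    if 1 < hi - lo then
      if (PySem.Int.floordiv (lo + hi) 2) * (PySem.Int.floordiv (lo + hi) 2) ≤ n then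
        isqrtAux n fuel (PySem.Int.floordiv (lo + hi) 2) hi
      else
        isqrtAux n fuel lo (PySem.Int.floordiv (lo + hi) 2)
    else lo

def pyIsqrt (n : Int) : Int := isqrtAux n (n + 1).toNat 0 (n + 1)

-- Source B's _odds: odd integers in [a, c], ascending
def odds (a c : Int) : List Int :=
  PySem.List.pyRange (if PySem.Int.mod a 2 ≠ 0 then a else a + 1) (c + 1) 2

def hits_y_timestamps_alt (y_velocity : Int) (y_ranges : List Int) : List Int :=
  match y_ranges with
  | [] => []      -- Python raises IndexError here; outside Pre_
  | [_] => []     -- Python raises IndexError here; outside Pre_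
  | lo :: hi :: _ =>
    let b := 2 * y_velocity + 1
    let d1 := b * b - 8 * lo
    if d1 < 0 then []
    else
      let r1 := pyIsqrt d1
      let d2 := b * b - 8 * hi
      let m := if d2 ≤ 0 then 1 else pyIsqrt (d2 - 1) + 1
      ((odds (-r1) (-m) ++ odds m r1).filter (fun u => 2 - b ≤ u)).map
        (fun u => PySem.Int.floordiv (u + b) 2)

-- ===== PRECONDITION & SPEC =====
-- Pre_ excludes y_ranges with fewer than two elements: both programs index y_ranges[1]
-- (A raises IndexError whenever the trajectory reaches the target, and returns [] otherwise;
-- B always raises there).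
def Pre_hits_y_timestamps (y_velocity : Int) (y_ranges : List Int) : Prop :=
  2 ≤ y_ranges.length
instance (y_velocity : Int) (y_ranges : List Int) : Decidable (Pre_hits_y_timestamps y_velocity y_ranges) := by unfold Pre_hits_y_timestamps; infer_instance

def pvWitness_hits_y_timestamps : Int × List Int := (5, [3, 10])

def Spec_hits_y_timestamps (y_velocity : Int) (y_ranges : List Int) (out : List Int) : Prop := out = hits_y_timestamps_alt y_velocity y_ranges
instance (y_velocity : Int) (y_ranges : List Int) (out : List Int) : Decidable (Spec_hits_y_timestamps y_velocity y_ranges out) := by unfold Spec_hits_y_timestamps; infer_instance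

-- ===== CLAIM (what is proved, stated in full; the proofs are below) =====
def Claim_equal_hits_y_timestamps : Prop := ∀ (y_velocity : Int) (y_ranges : List Int), Dom_hits_y_timestamps y_velocity y_ranges → Pre_hits_y_timestamps y_velocity y_ranges → Spec_hits_y_timestamps y_velocity y_ranges (hits_y_timestamps y_velocity y_ranges)

-- ===== LEMMAS AND PROOFS =====

-- trajectory: Ys y w k = position after k further steps from position y, velocity w
def Ys (y w : Int) : Nat → Int
  | 0 => y
  | k + 1 => Ys y w k + (w - k)

theorem Ys_shift (y w : Int) (k : Nat) : Ys y w (k + 1) = Ys (y + w) (w - 1) k := by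
  induction k with
  | zero => simp [Ys]
  | succ k ih =>
    show Ys y w (k + 1) + (w - (k + 1 : Nat)) = Ys (y + w) (w - 1) k + ((w - 1) - k)
    rw [ih]; push_cast; ring

theorem Ys_le_of_nonpos (y w : Int) (hw : w ≤ 0) (k : Nat) : Ys y w k ≤ y := by
  induction k with
  | zero => simp [Ys]
  | succ k ih =>
    have : (0 : Int) ≤ k := Int.natCast_nonneg k
    simp only [Ys]; omega

theorem two_mul_Ys (v : Int) (k : Nat) : 2 * Ys 0 v k = k * (2 * v + 1 - k) := by
  induction k with
  | zero => simp [Ys]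
  | succ k ih =>
    show 2 * (Ys 0 v k + (v - k)) = (k + 1 : Nat) * (2 * v + 1 - (k + 1 : Nat))
    push_cast
    linear_combination ih

theorem hitsFuel_step (lo y w : Int) (h : lo ≤ y ∨ 0 < w) :
    hitsFuel lo (y + w) (w - 1) < hitsFuel lo y w := by
  unfold hitsFuel
  have e : (w - 1) * (w - 1 + 1) = w * (w + 1) - 2 * w := by ring
  have e2 : 0 ≤ w * (w + 1) := by
    by_cases hv : 0 ≤ w
    · exact mul_nonneg hv (by omega)
    · have hm := mul_nonneg (a := -w) (b := -(w + 1)) (by omega) (by omega)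
      nlinarith [hm]
  have e3 : 0 < w → w - 1 ≤ 0 → w * (w + 1) = 2 := by
    intro hv1 hv2
    have hv : w = 1 := by omega
    subst hv; ring
  split_ifs <;> omega

theorem mem_hitsAux (lo hi : Int) :
    ∀ (fuel : Nat) (y w t : Int) (acc : List Int) (s : Int), hitsFuel lo y w ≤ fuel →
      (s ∈ hitsAux lo hi fuel y w t acc ↔
        s ∈ acc ∨ ∃ k : Nat, 1 ≤ k ∧ s = t + k ∧ lo ≤ Ys y w k ∧ Ys y w k ≤ hi) := by
  intro fuel
  induction fuel with
  | zero =>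
    intro y w t acc s hf
    -- zero fuel forces w ≤ -1 and y < lo: the guard is already false, and the
    -- trajectory only keeps falling, so there is no future hit
    unfold hitsFuel at hf
    have hw1 : w ≤ 0 := by omega
    have htri : (if 0 < w then w * (w + 1) else 0) = 0 := if_neg (by omega)
    have hylo : y < lo := by omega
    simp only [hitsAux]
    constructor
    · exact Or.inl
    · rintro (hmem | ⟨k, hk1, hks, hklo, hkhi⟩)
      · exact hmem
      · exfalso
        have := Ys_le_of_nonpos y w hw1 k
        omega
  | succ fuel ih =>
    intro y w t acc s hf
    by_cases h : lo ≤ y ∨ 0 < w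
    · have hstep : hitsAux lo hi (fuel + 1) y w t acc =
          hitsAux lo hi fuel (y + w) (w - 1) (t + 1)
            (if lo ≤ y + w ∧ y + w ≤ hi then acc ++ [t + 1] else acc) := by
        simp only [hitsAux, if_pos h]
      rw [hstep, ih (y + w) (w - 1) (t + 1) _ s (by have := hitsFuel_step lo y w h; omega)]
      constructor
      · rintro (hmem | ⟨k, hk1, hks, hklo, hkhi⟩)
        · by_cases hh : lo ≤ y + w ∧ y + w ≤ hi
          · rw [if_pos hh] at hmem
            rcases List.mem_append.mp hmem with hmem | hmem
            · exact Or.inl hmem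
            · have hs : s = t + 1 := List.mem_singleton.mp hmem
              refine Or.inr ⟨1, le_refl 1, by push_cast; omega, ?_, ?_⟩
              · simpa [Ys] using hh.1
              · simpa [Ys] using hh.2
          · rw [if_neg hh] at hmem
            exact Or.inl hmem
        · refine Or.inr ⟨k + 1, by omega, by push_cast at hks ⊢; omega, ?_, ?_⟩
          · rw [Ys_shift]; exact hklo
          · rw [Ys_shift]; exact hkhi
      · rintro (hmem | ⟨k, hk1, hks, hklo, hkhi⟩)
        · left; split_ifs with hh
          · exact List.mem_append_left _ hmem
          · exact hmem
        · rcases Nat.eq_or_lt_of_le hk1 with h1 | h1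
          · -- k = 1 : this is the element appended now (it is a hit)
            have hk : k = 1 := h1.symm
            subst hk
            have hy : Ys y w 1 = y + w := by simp [Ys]
            rw [hy] at hklo hkhi
            left
            rw [if_pos ⟨hklo, hkhi⟩]
            refine List.mem_append.mpr (Or.inr ?_)
            have hs : s = t + 1 := by push_cast at hks; omega
            simp [hs]
          · refine Or.inr ⟨k - 1, by omega, ?_, ?_, ?_⟩
            · have : ((k - 1 : Nat) : Int) = (k : Int) - 1 := by omega
              push_cast at hks ⊢; omega
            · rw [← Ys_shift]; have : k - 1 + 1 = k := by omega
              rw [this]; exact hklo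
            · rw [← Ys_shift]; have : k - 1 + 1 = k := by omega
              rw [this]; exact hkhi
    · have hstop : hitsAux lo hi (fuel + 1) y w t acc = acc := by
        simp only [hitsAux, if_neg h]
      rw [hstop]
      constructor
      · exact Or.inl
      · rintro (hmem | ⟨k, hk1, hks, hklo, hkhi⟩)
        · exact hmem
        · exfalso
          simp only [not_or] at h
          have := Ys_le_of_nonpos y w (by omega) k
          omega

theorem pairwise_hitsAux (lo hi : Int) :
    ∀ (fuel : Nat) (y w t : Int) (acc : List Int), acc.Pairwise (· < ·) →
      (∀ a ∈ acc, a ≤ t) → (hitsAux lo hi fuel y w t acc).Pairwise (· < ·) := by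
  intro fuel
  induction fuel with
  | zero =>
    intro y w t acc hpw hle
    simpa only [hitsAux] using hpw
  | succ fuel ih =>
    intro y w t acc hpw hle
    by_cases h : lo ≤ y ∨ 0 < w
    · have hstep : hitsAux lo hi (fuel + 1) y w t acc =
          hitsAux lo hi fuel (y + w) (w - 1) (t + 1)
            (if lo ≤ y + w ∧ y + w ≤ hi then acc ++ [t + 1] else acc) := by
        simp only [hitsAux, if_pos h]
      rw [hstep]
      apply ih
      · split_ifs with hh
        · rw [List.pairwise_append]
          refine ⟨hpw, List.pairwise_singleton _ _, ?_⟩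
          intro a ha b hb
          simp only [List.mem_singleton] at hb
          subst hb
          have := hle a ha; omega
        · exact hpw
      · intro a ha
        split_ifs at ha with hh
        · rcases List.mem_append.mp ha with ha | ha
          · have := hle a ha; omega
          · simp only [List.mem_singleton] at ha; omega
        · have := hle a ha; omega
    · have hstop : hitsAux lo hi (fuel + 1) y w t acc = acc := by
        simp only [hitsAux, if_neg h]
      rw [hstop]
      exact hpw

theorem isqrtAux_spec (n : Int) :
    ∀ (fuel : Nat) (lo hi : Int), (hi - lo).toNat ≤ fuel → 0 ≤ lo → lo * lo ≤ n →
      n < hi * hi → lo < hi →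
      0 ≤ isqrtAux n fuel lo hi ∧ isqrtAux n fuel lo hi * isqrtAux n fuel lo hi ≤ n ∧
        n < (isqrtAux n fuel lo hi + 1) * (isqrtAux n fuel lo hi + 1) := by
  intro fuel
  induction fuel with
  | zero =>
    intro lo hi hf h0 h1 h2 h3
    exfalso; omega
  | succ f ih =>
    intro lo hi hf h0 h1 h2 h3
    have hmid : PySem.Int.floordiv (lo + hi) 2 = (lo + hi) / 2 :=
      PySem.Int.floordiv_eq_ediv_of_pos (by norm_num)
    simp only [isqrtAux, hmid]
    split_ifs with hg hc
    · exact ih ((lo + hi) / 2) hi (by omega) (by omega) hc h2 (by omega)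
    · exact ih lo ((lo + hi) / 2) (by omega) h0 h1 (by omega) (by omega)
    · have hhi : hi = lo + 1 := by omega
      subst hhi
      exact ⟨h0, h1, h2⟩

theorem pyIsqrt_spec (n : Int) (hn : 0 ≤ n) :
    0 ≤ pyIsqrt n ∧ pyIsqrt n * pyIsqrt n ≤ n ∧ n < (pyIsqrt n + 1) * (pyIsqrt n + 1) := by
  unfold pyIsqrt
  exact isqrtAux_spec n (n + 1).toNat 0 (n + 1) (by omega) (by omega) (by simpa)
    (by nlinarith) (by omega)

theorem mem_odds (a c x : Int) : x ∈ odds a c ↔ a ≤ x ∧ x ≤ c ∧ ¬ (2 ∣ x) := by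
  unfold odds
  rw [PySem.List.mem_pyRange_iff_of_pos (by norm_num)]
  have hm : PySem.Int.mod a 2 = a % 2 := PySem.Int.mod_eq_emod_of_pos (by norm_num)
  split_ifs with hs
  · rw [hm] at hs; omega
  · rw [hm] at hs; omega

theorem pairwise_odds (a c : Int) : (odds a c).Pairwise (· < ·) := by
  unfold odds
  rw [PySem.List.pyRange_of_pos _ _ (by norm_num), List.pairwise_map]
  exact List.pairwise_lt_range.imp (by intro a b h; omega)

theorem floordiv_double (s : Int) : PySem.Int.floordiv (2 * s) 2 = s := by
  rw [PySem.Int.floordiv_eq_ediv_of_pos (by norm_num)]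
  omega

theorem mem_alt (v lo hi : Int) (rest : List Int) (s : Int) :
    s ∈ hits_y_timestamps_alt v (lo :: hi :: rest) ↔
      1 ≤ s ∧ 2 * lo ≤ s * (2 * v + 1 - s) ∧ s * (2 * v + 1 - s) ≤ 2 * hi := by
  simp only [hits_y_timestamps_alt]
  by_cases hd1 : (2*v+1)*(2*v+1) - 8*lo < 0
  · rw [if_pos hd1]
    -- no timestamp can satisfy the lower bound
    simp only [List.not_mem_nil, false_iff]
    rintro ⟨h1, h2, h3⟩
    nlinarith [sq_nonneg (2 * s - (2 * v + 1))]
  · rw [if_neg hd1]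
    push_neg at hd1
    obtain ⟨hr0, hr1, hr2⟩ := pyIsqrt_spec ((2*v+1)*(2*v+1) - 8*lo) hd1
    simp only [List.mem_map, List.mem_filter, List.mem_append, decide_eq_true_eq]
    constructor
    · rintro ⟨u, ⟨hu, hub⟩, rfl⟩
      have hodd : ¬ ((2:Int) ∣ u) := by
        rcases hu with hu | hu
        · exact ((mem_odds _ _ u).mp hu).2.2
        · exact ((mem_odds _ _ u).mp hu).2.2
      obtain ⟨s', hs'⟩ : (2 : Int) ∣ (u + (2*v+1)) := by omega
      have hfd : PySem.Int.floordiv (u + (2*v+1)) 2 = s' := by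
        rw [hs']; exact floordiv_double s'
      rw [hfd]
      have hueq : u = 2 * s' - (2*v+1) := by omega
      have key : u * u = (2*v+1)*(2*v+1) - 4 * (s' * (2*v+1-s')) := by rw [hueq]; ring
      have hm1 : (1:Int) ≤ (if (2*v+1)*(2*v+1) - 8*hi ≤ 0 then (1:Int)
          else pyIsqrt ((2*v+1)*(2*v+1) - 8*hi - 1) + 1) := by
        split_ifs with hd2
        · exact le_refl 1
        · have := (pyIsqrt_spec ((2*v+1)*(2*v+1) - 8*hi - 1) (by omega)).1
          omega
      have hbound : (-(pyIsqrt ((2*v+1)*(2*v+1) - 8*lo)) ≤ u ∧ u ≤ -1) ∨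
          (1 ≤ u ∧ u ≤ pyIsqrt ((2*v+1)*(2*v+1) - 8*lo)) := by
        rcases hu with hu | hu
        · obtain ⟨hl, hr, _⟩ := (mem_odds _ _ u).mp hu
          left; exact ⟨hl, by omega⟩
        · obtain ⟨hl, hr, _⟩ := (mem_odds _ _ u).mp hu
          right; exact ⟨by omega, hr⟩
      have husq1 : u * u ≤ (2*v+1)*(2*v+1) - 8*lo := by
        rcases hbound with ⟨hl, hr⟩ | ⟨hl, hr⟩ <;> nlinarith [hr1, hr0]
      have husq2 : (2*v+1)*(2*v+1) - 8*hi ≤ u * u := by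
        by_cases hd2 : (2*v+1)*(2*v+1) - 8*hi ≤ 0
        · nlinarith [mul_self_nonneg u]
        · rw [if_neg hd2] at hu
          push_neg at hd2
          obtain ⟨hq0, hq1, hq2⟩ := pyIsqrt_spec ((2*v+1)*(2*v+1) - 8*hi - 1) (by omega)
          rcases hu with hu | hu
          · obtain ⟨hl, hr, _⟩ := (mem_odds _ _ u).mp hu
            nlinarith [hq2, hq0, mul_self_nonneg (u + (pyIsqrt ((2*v+1)*(2*v+1) - 8*hi - 1) + 1))]
          · obtain ⟨hl, hr, _⟩ := (mem_odds _ _ u).mp hu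
            nlinarith [hq2, hq0, mul_self_nonneg (u - (pyIsqrt ((2*v+1)*(2*v+1) - 8*hi - 1) + 1))]
      refine ⟨by omega, by nlinarith, by nlinarith⟩
    · rintro ⟨h1, h2, h3⟩
      refine ⟨2 * s - (2*v+1), ⟨?_, by omega⟩, ?_⟩
      · have key : (2*s - (2*v+1)) * (2*s - (2*v+1))
            = (2*v+1)*(2*v+1) - 4 * (s * (2*v+1-s)) := by ring
        have hle : (2*s - (2*v+1)) * (2*s - (2*v+1)) ≤ (2*v+1)*(2*v+1) - 8*lo := by
          nlinarith
        have hub : 2*s - (2*v+1) ≤ pyIsqrt ((2*v+1)*(2*v+1) - 8*lo) := by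
          by_contra hcon
          push_neg at hcon
          nlinarith
        have hlb : -(pyIsqrt ((2*v+1)*(2*v+1) - 8*lo)) ≤ 2*s - (2*v+1) := by
          by_contra hcon
          push_neg at hcon
          nlinarith
        have hodd : ¬ ((2:Int) ∣ (2*s - (2*v+1))) := by omega
        by_cases hd2 : (2*v+1)*(2*v+1) - 8*hi ≤ 0
        · -- m = 1 : the odd u is never 0
          rw [if_pos hd2]
          rcases le_or_gt (2*s - (2*v+1)) (-1) with hside | hside
          · exact Or.inl ((mem_odds _ _ _).mpr ⟨by omega, by omega, hodd⟩)
          · exact Or.inr ((mem_odds _ _ _).mpr ⟨by omega, by omega, hodd⟩)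
        · rw [if_neg hd2]
          push_neg at hd2
          obtain ⟨hq0, hq1, hq2⟩ := pyIsqrt_spec ((2*v+1)*(2*v+1) - 8*hi - 1) (by omega)
          have hge : (2*v+1)*(2*v+1) - 8*hi ≤ (2*s - (2*v+1)) * (2*s - (2*v+1)) := by
            nlinarith
          have habs : pyIsqrt ((2*v+1)*(2*v+1) - 8*hi - 1) + 1 ≤ 2*s - (2*v+1) ∨
              2*s - (2*v+1) ≤ -(pyIsqrt ((2*v+1)*(2*v+1) - 8*hi - 1) + 1) := by
            by_contra hcon
            push_neg at hcon
            obtain ⟨hc1, hc2⟩ := hcon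
            nlinarith
          rcases habs with hside | hside
          · exact Or.inr ((mem_odds _ _ _).mpr ⟨by omega, by omega, hodd⟩)
          · exact Or.inl ((mem_odds _ _ _).mpr ⟨by omega, by omega, hodd⟩)
      · obtain ⟨s', hs'⟩ : (2 : Int) ∣ ((2*s - (2*v+1)) + (2*v+1)) := by omega
        rw [hs', floordiv_double]
        omega

theorem pairwise_alt (v : Int) (lo hi : Int) (rest : List Int) :
    (hits_y_timestamps_alt v (lo :: hi :: rest)).Pairwise (· < ·) := by
  simp only [hits_y_timestamps_alt]
  by_cases hd1 : (2*v+1)*(2*v+1) - 8*lo < 0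
  · rw [if_pos hd1]
    exact List.Pairwise.nil
  · rw [if_neg hd1]
    push_neg at hd1
    set r1 := pyIsqrt ((2*v+1)*(2*v+1) - 8*lo) with hr1def
    set m := (if (2*v+1)*(2*v+1) - 8*hi ≤ 0 then (1:Int)
        else pyIsqrt ((2*v+1)*(2*v+1) - 8*hi - 1) + 1) with hmdef
    have hm1 : (1 : Int) ≤ m := by
      rw [hmdef]
      split_ifs with hd2
      · exact le_refl 1
      · push_neg at hd2
        have := (pyIsqrt_spec ((2*v+1)*(2*v+1) - 8*hi - 1) (by omega)).1
        omega
    have hpw : (odds (-r1) (-m) ++ odds m r1).Pairwise (· < ·) := by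
      rw [List.pairwise_append]
      refine ⟨pairwise_odds _ _, pairwise_odds _ _, ?_⟩
      intro x hx y hy
      obtain ⟨hx1, hx2, _⟩ := (mem_odds _ _ _).mp hx
      obtain ⟨hy1, hy2, _⟩ := (mem_odds _ _ _).mp hy
      omega
    have hpwf := hpw.filter (fun u => decide (2 - (2*v+1) ≤ u))
    rw [List.pairwise_map]
    refine List.Pairwise.imp_of_mem ?_ hpwf
    intro u1 u2 hu1 hu2 hlt
    have ho1 : ¬ ((2:Int) ∣ u1) := by
      rcases List.mem_append.mp (List.mem_of_mem_filter hu1) with h | h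
      · exact ((mem_odds _ _ _).mp h).2.2
      · exact ((mem_odds _ _ _).mp h).2.2
    have ho2 : ¬ ((2:Int) ∣ u2) := by
      rcases List.mem_append.mp (List.mem_of_mem_filter hu2) with h | h
      · exact ((mem_odds _ _ _).mp h).2.2
      · exact ((mem_odds _ _ _).mp h).2.2
    obtain ⟨s1, hs1⟩ : (2:Int) ∣ (u1 + (2*v+1)) := by omega
    obtain ⟨s2, hs2⟩ : (2:Int) ∣ (u2 + (2*v+1)) := by omega
    rw [hs1, hs2, floordiv_double, floordiv_double]
    omega

-- two strictly increasing lists with the same members are equal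
theorem eq_of_pairwise_lt_of_mem_iff :
    ∀ (l1 l2 : List Int), l1.Pairwise (· < ·) → l2.Pairwise (· < ·) →
      (∀ x, x ∈ l1 ↔ x ∈ l2) → l1 = l2 := by
  intro l1
  induction l1 with
  | nil =>
    intro l2 _ _ hmem
    cases l2 with
    | nil => rfl
    | cons b t2 => exact absurd ((hmem b).mpr (List.mem_cons_self)) (List.not_mem_nil)
  | cons a t1 ih =>
    intro l2 h1 h2 hmem
    cases l2 with
    | nil => exact absurd ((hmem a).mp (List.mem_cons_self)) (List.not_mem_nil)
    | cons b t2 =>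
      have ha2 : a ∈ b :: t2 := (hmem a).mp List.mem_cons_self
      have hb1 : b ∈ a :: t1 := (hmem b).mpr List.mem_cons_self
      have hab : a = b := by
        rcases List.mem_cons.mp ha2 with h | h
        · exact h
        · rcases List.mem_cons.mp hb1 with h' | h'
          · omega
          · have hba : b < a := List.rel_of_pairwise_cons h2 h
            have hab' : a < b := List.rel_of_pairwise_cons h1 h'
            omega
      subst hab
      have htl : t1 = t2 := by
        apply ih t2 (List.Pairwise.of_cons h1) (List.Pairwise.of_cons h2)
        intro x
        constructor
        · intro hx
          have hax : a < x := List.rel_of_pairwise_cons h1 hx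
          rcases List.mem_cons.mp ((hmem x).mp (List.mem_cons_of_mem a hx)) with h | h
          · omega
          · exact h
        · intro hx
          have hax : a < x := List.rel_of_pairwise_cons h2 hx
          rcases List.mem_cons.mp ((hmem x).mpr (List.mem_cons_of_mem a hx)) with h | h
          · omega
          · exact h
      rw [htl]

-- ===== VERDICT (by name: the statement is the Claim_ definition above) =====
theorem hits_y_timestamps_spec : Claim_equal_hits_y_timestamps := by
  intro v yr hdom hpre
  unfold Spec_hits_y_timestamps
  rcases yr with _ | ⟨lo, _ | ⟨hi, rest⟩⟩
  · exact absurd hpre (by simp [Pre_hits_y_timestamps])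
  · exact absurd hpre (by simp [Pre_hits_y_timestamps])
  · show hitsAux lo hi (hitsFuel lo 0 v) 0 v 0 [] = hits_y_timestamps_alt v (lo :: hi :: rest)
    apply eq_of_pairwise_lt_of_mem_iff
    · exact pairwise_hitsAux lo hi (hitsFuel lo 0 v) 0 v 0 [] List.Pairwise.nil (by simp)
    · exact pairwise_alt v lo hi rest
    · intro s
      rw [mem_hitsAux lo hi (hitsFuel lo 0 v) 0 v 0 [] s (le_refl _), mem_alt]
      simp only [List.not_mem_nil, false_or]
      constructor
      · rintro ⟨k, hk1, hks, hklo, hkhi⟩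
        have htm := two_mul_Ys v k
        have hsk : s = (k : Int) := by omega
        subst hsk
        refine ⟨by omega, by omega, by omega⟩
      · rintro ⟨h1, h2, h3⟩
        have hc : ((s.toNat : Int)) = s := by omega
        have htm := two_mul_Ys v s.toNat
        rw [hc] at htm
        exact ⟨s.toNat, by omega, by omega, by omega, by omega⟩
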